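-- pv_equiv track=rewrite | github.com/incnone/necrobot | necrobot/daily/dailytype.py | days_until
-- ===== SOURCE A (Python) =====
-- from enum import Enum
--
-- class DailyType(Enum):
--     CADENCE = 0
--     ROTATING = 1
--
--     def __str__(self):
--         if self == DailyType.CADENCE:
--             return 'Cadence'
--         elif self == DailyType.ROTATING:
--             return 'rotating-character'
--
-- rotating_daily_chars = [
--     'Eli',
--     'Diamond',
--     'Bolt',
--     'Dove',
--     'Aria',
--     'Bard',
--     'Dorian',
--     'Coda',
--     'Nocturna',
--     'Melody',
--     'Monk']
--
-- def character(daily_type, daily_number):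
--     if daily_type == DailyType.CADENCE:
--         return 'Cadence'
--     elif daily_type == DailyType.ROTATING:
--         return rotating_daily_chars[daily_number % len(rotating_daily_chars)]
--
-- def days_until(charname, daily_number):
--     days = 0
--     today_char = character(DailyType.ROTATING, daily_number)
--
--     found_start = False
--     for char in rotating_daily_chars:
--         if char == today_char:
--             found_start = True
--         elif found_start:
--             days += 1
--             if char == charname:
--                 return days
--
--     for char in rotating_daily_chars:
--         days += 1
--         if char == charname:
--             return days
-- ===== SOURCE B (Python) =====
-- rotating_daily_chars = [
--     'Eli',
--     'Diamond',
--     'Bolt',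
--     'Dove',
--     'Aria',
--     'Bard',
--     'Dorian',
--     'Coda',
--     'Nocturna',
--     'Melody',
--     'Monk']
--
-- def days_until(charname, daily_number):
--     n = len(rotating_daily_chars)
--     if charname not in rotating_daily_chars:
--         return None
--     t = daily_number % n
--     i = rotating_daily_chars.index(charname)
--     return ((i - t - 1) % n) + 1
-- ===== Notes on version B (the rewrite author's own statement) =====
-- stated objective: simpler
-- what changed: Replaced A's two accumulating scans (find today's character, then count forward with wrap-around via a second loop) by a membership test plus a single closed-form modular offset ((index - today - 1) % 11) + 1.
import Mathlib
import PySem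

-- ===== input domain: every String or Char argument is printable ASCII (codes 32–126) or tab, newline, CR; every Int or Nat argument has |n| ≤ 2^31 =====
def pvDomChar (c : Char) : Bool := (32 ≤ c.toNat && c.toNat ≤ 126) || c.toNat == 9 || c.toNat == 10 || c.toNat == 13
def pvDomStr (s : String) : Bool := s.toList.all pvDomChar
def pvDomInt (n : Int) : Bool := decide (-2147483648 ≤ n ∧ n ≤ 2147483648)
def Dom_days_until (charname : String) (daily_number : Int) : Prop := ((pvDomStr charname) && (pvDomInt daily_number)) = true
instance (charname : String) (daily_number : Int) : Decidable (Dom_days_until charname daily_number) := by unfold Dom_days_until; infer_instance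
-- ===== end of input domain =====

-- ===== PORT A =====
-- One honest line: B replaces A's two accumulating scans with an index lookup and a closed-form modular offset (simpler).
def rotatingDailyChars : List String :=
  ["Eli", "Diamond", "Bolt", "Dove", "Aria", "Bard", "Dorian", "Coda", "Nocturna", "Melody", "Monk"]

-- character(DailyType.ROTATING, daily_number): rotating_daily_chars[daily_number % len(...)]
-- (the index daily_number % 11 is always in range, so pyGet? is always some; getD "" is never taken)
def character (daily_number : Int) : String :=
  (PySem.List.pyGet? rotatingDailyChars (PySem.Int.mod daily_number (rotatingDailyChars.length : Int))).getD ""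

-- first loop of A: either early-returns days (.inl) or falls through with the final days (.inr)
def aLoop1 (charname today : String) : List String -> Int -> Bool -> Int ⊕ Int
  | [], days, _ => .inr days
  | c :: cs, days, found =>
    if c = today then aLoop1 charname today cs days true
    else if found then
      if c = charname then .inl (days + 1) else aLoop1 charname today cs (days + 1) found
    else aLoop1 charname today cs days found

-- second loop of A: counts on from days, returns when charname is hit, else falls off (None)
def aLoop2 (charname : String) : List String -> Int -> Option Int
  | [], _ => none
  | c :: cs, days =>
    if c = charname then some (days + 1) else aLoop2 charname cs (days + 1)

def days_until (charname : String) (daily_number : Int) : Option Int :=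
  let today_char := character daily_number
  match aLoop1 charname today_char rotatingDailyChars 0 false with
  | .inl d => some d
  | .inr days => aLoop2 charname rotatingDailyChars days

-- ===== PORT B =====
def days_until_alt (charname : String) (daily_number : Int) : Option Int :=
  let n : Int := (rotatingDailyChars.length : Int)
  if rotatingDailyChars.contains charname then
    match PySem.List.index? rotatingDailyChars charname with
    | some i =>
      let t := PySem.Int.mod daily_number n
      some (PySem.Int.mod ((i : Int) - t - 1) n + 1)
    | none => none
  else none

-- ===== PRECONDITION & SPEC =====
def Spec_days_until (charname : String) (daily_number : Int) (out : Option Int) : Prop := out = days_until_alt charname daily_number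
instance (charname : String) (daily_number : Int) (out : Option Int) : Decidable (Spec_days_until charname daily_number out) := by unfold Spec_days_until; infer_instance

-- ===== CLAIM (what is proved, stated in full; the proofs are below) =====
def Claim_equal_days_until : Prop := ∀ (charname : String) (daily_number : Int), Dom_days_until charname daily_number → Spec_days_until charname daily_number (days_until charname daily_number)

-- ===== LEMMAS AND PROOFS =====

theorem aLoop2_none (charname : String) (l : List String) (h : charname ∉ l) :
    ∀ d : Int, aLoop2 charname l d = none := by
  induction l with
  | nil => intro d; rfl
  | cons c cs ih =>
    intro d
    simp only [List.mem_cons, not_or] at h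
    simp only [aLoop2, if_neg (Ne.symm h.1)]
    exact ih h.2 _

theorem aLoop1_inr (charname today : String) (l : List String) (h : charname ∉ l) :
    ∀ (d : Int) (f : Bool), ∃ d', aLoop1 charname today l d f = .inr d' := by
  induction l with
  | nil => intro d f; exact ⟨d, rfl⟩
  | cons c cs ih =>
    intro d f
    simp only [List.mem_cons, not_or] at h
    simp only [aLoop1]
    split
    · exact ih h.2 d true
    · split
      · rw [if_neg (Ne.symm h.1)]
        exact ih h.2 (d + 1) f
      · exact ih h.2 d f

theorem days_until_eq_alt (charname : String) (daily_number : Int) :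
    days_until charname daily_number = days_until_alt charname daily_number := by
  have hlen : (rotatingDailyChars.length : Int) = 11 := by decide
  by_cases hc : charname ∈ rotatingDailyChars
  · -- charname is one of the 11 literals; case on which, and on t = daily_number % 11
    have ht : 0 ≤ PySem.Int.mod daily_number (rotatingDailyChars.length : Int) ∧
        PySem.Int.mod daily_number (rotatingDailyChars.length : Int) < 11 := by
      rw [hlen, PySem.Int.mod_eq_emod_of_pos (by norm_num)]
      constructor
      · exact Int.emod_nonneg _ (by omega)
      · exact Int.emod_lt_of_pos _ (by omega)
    simp only [days_until, days_until_alt, character]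
    generalize hgen : PySem.Int.mod daily_number (rotatingDailyChars.length : Int) = t at ht ⊢
    obtain ⟨h0, h1⟩ := ht
    fin_cases hc <;> interval_cases t <;> decide
  · -- charname absent: A falls off both loops (None); B's membership test fails (None)
    obtain ⟨d', hd⟩ := aLoop1_inr charname (character daily_number) rotatingDailyChars hc 0 false
    simp only [days_until, days_until_alt]
    rw [hd]
    simp only [aLoop2_none charname rotatingDailyChars hc]
    rw [if_neg (by simpa using hc)]

-- ===== VERDICT (by name: the statement is the Claim_ definition above) =====
theorem days_until_spec : Claim_equal_days_until := by
  intro charname daily_number _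
  unfold Spec_days_until
  exact days_until_eq_alt charname daily_number
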